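-- pv_equiv track=rewrite | github.com/PrinceSinghhub/GFG-Questions | Convert an array to reduced form .py | convert
-- ===== SOURCE A (Python) =====
-- def convert(arr, n):
--     temp = [arr[i] for i in range(n)]
--
-- # Sort temp array
--     temp.sort()
--
--     # create a map
--     umap = {}
--
--     # One by one insert elements of sorted
--     # temp[] and assign them values from 0
--     # to n-1
--     val = 0
--     for i in range(n):
--         umap[temp[i]] = val
--         val += 1
--
--     # Convert array by taking positions from umap
--     for i in range(n):
--         arr[i] = umap[arr[i]]
--
--     return arr
-- ===== SOURCE B (Python) =====
-- def convert(arr, n):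
--     ref = arr[:n]
--     for i in range(n):
--         x = ref[i]
--         arr[i] = sum(1 for v in ref if v <= x) - 1
--     return arr
-- ===== Notes on version B (the rewrite author's own statement) =====
-- stated objective: simpler
-- what changed: The sort, the rank dictionary and the lookup pass are all removed: the rank of an element is computed directly as the number of elements <= it, minus one, by a plain counting scan over an unsorted snapshot of the prefix (comparison-counting rank instead of sort-based ranking).
import Mathlib
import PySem

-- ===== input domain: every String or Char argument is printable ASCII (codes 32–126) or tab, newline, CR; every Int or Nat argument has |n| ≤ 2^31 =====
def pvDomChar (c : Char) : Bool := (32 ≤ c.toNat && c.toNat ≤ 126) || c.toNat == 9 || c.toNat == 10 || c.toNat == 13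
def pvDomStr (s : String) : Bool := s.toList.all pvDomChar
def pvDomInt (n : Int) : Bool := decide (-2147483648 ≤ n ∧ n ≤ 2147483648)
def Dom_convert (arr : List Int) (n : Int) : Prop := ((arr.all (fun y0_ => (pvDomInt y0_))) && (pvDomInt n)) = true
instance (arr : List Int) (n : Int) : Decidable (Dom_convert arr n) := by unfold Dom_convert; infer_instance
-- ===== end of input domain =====

-- B removes A's sort + rank dictionary entirely: each element's rank is counted directly as
-- (#elements ≤ it) - 1 over an unsorted snapshot of the prefix — simpler, no sort, no dict
-- (equivalence is about the RETURN value; both Pythons also mutate arr in place identically).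

-- ===== PORT A =====
def convert (arr : List Int) (n : Int) : List Int :=
  let temp0 := (PySem.List.pyRange 0 n).map (fun i => PySem.List.pyGetD arr i 0)
  let temp := PySem.List.sorted temp0 (fun x => x)
  let umapval := (PySem.List.pyRange 0 n).foldl
      (fun (s : PySem.Dict Int Int × Int) i =>
        (s.1.insert (PySem.List.pyGetD temp i 0) s.2, s.2 + 1))
      (PySem.Dict.empty, 0)
  -- i drawn from range(n) is ≥ 0, so 'arr[i] = …' is List.set i.toNat (no negative index reachable)
  (PySem.List.pyRange 0 n).foldl
      (fun a i => a.set i.toNat (umapval.1.getD (PySem.List.pyGetD a i 0) 0)) arr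

-- ===== PORT B =====
def convert_alt (arr : List Int) (n : Int) : List Int :=
  let ref := PySem.List.slice arr none (some n)
  (PySem.List.pyRange 0 n).foldl
      (fun a i =>
        let x := PySem.List.pyGetD ref i 0
        a.set i.toNat ((ref.foldl (fun acc v => if v ≤ x then acc + 1 else acc) (0 : Int)) - 1))
      arr

-- ===== PRECONDITION & SPEC =====
-- Pre_ excludes exactly the inputs where Python A raises IndexError: n > len(arr) (negative n is fine: range(n) is empty).
def Pre_convert (arr : List Int) (n : Int) : Prop := n ≤ (arr.length : Int)
instance (arr : List Int) (n : Int) : Decidable (Pre_convert arr n) := by unfold Pre_convert; infer_instance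
def pvWitness_convert : List Int × Int := ([3, 1, 2, 1], 4)

def Spec_convert (arr : List Int) (n : Int) (out : List Int) : Prop := out = convert_alt arr n
instance (arr : List Int) (n : Int) (out : List Int) : Decidable (Spec_convert arr n out) := by unfold Spec_convert; infer_instance

-- ===== CLAIM (what is proved, stated in full; the proofs are below) =====
def Claim_equal_convert : Prop := ∀ (arr : List Int) (n : Int), Dom_convert arr n → Pre_convert arr n → Spec_convert arr n (convert arr n)

-- ===== LEMMAS AND PROOFS =====

-- the comprehension [arr[i] for i in range(n)] is arr.take k when (k : Int) = n ≤ len(arr)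
lemma pv_take_map (arr : List Int) (k : Nat) (h : k ≤ arr.length) :
    (PySem.List.pyRange 0 (k : Int)).map (fun i => PySem.List.pyGetD arr i 0) = arr.take k := by
  have hlen : (arr.take k).length = k := by simp [List.length_take, Nat.min_eq_left h]
  have base := PySem.List.map_pyGetD_pyRange_zero' (arr.take k) 0
  rw [hlen] at base
  rw [← base]
  apply List.map_congr_left
  intro j hj
  rw [PySem.List.mem_pyRange_one] at hj
  obtain ⟨h0, hk⟩ := hj
  have hjn : j = ((j.toNat : Nat) : Int) := by omega
  have hlt : j.toNat < k := by omega
  rw [hjn, PySem.List.pyGetD_natCast, PySem.List.pyGetD_natCast]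
  rw [List.getD_eq_getElem _ _ (by omega), List.getD_eq_getElem _ _ (by rw [hlen]; omega)]
  simp [List.getElem_take]

-- A's write-back loop: after folding range(k), positions < k hold f(original element), the rest is untouched
lemma pv_fold_set (f : Int → Int) (arr : List Int) (k : Nat) (h : k ≤ arr.length) :
    (PySem.List.pyRange 0 (k : Int)).foldl
        (fun a i => a.set i.toNat (f (PySem.List.pyGetD a i 0))) arr
      = (arr.take k).map f ++ arr.drop k := by
  induction k with
  | zero => simp [PySem.List.pyRange]
  | succ k ih =>
    have hk : k ≤ arr.length := by omega
    have hklt : k < arr.length := by omega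
    have hcast : ((k + 1 : Nat) : Int) = (k : Int) + 1 := by push_cast; ring
    rw [hcast, PySem.List.pyRange_one_succ_right (by positivity), List.foldl_append, ih hk]
    simp only [List.foldl_cons, List.foldl_nil]
    have hlen : ((arr.take k).map f).length = k := by simp [Nat.min_eq_left hk]
    have htoNat : ((k : Int)).toNat = k := by omega
    have hget : PySem.List.pyGetD ((arr.take k).map f ++ arr.drop k) (k : Int) 0 = arr[k] := by
      rw [PySem.List.pyGetD_natCast, List.getD_eq_getElem _ _ (by simp; omega)]
      rw [List.getElem_append_right (by omega)]
      simp [List.getElem_drop, Nat.min_eq_left hk]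
    rw [htoNat, hget, List.set_append]
    rw [if_neg (by omega)]
    rw [hlen, Nat.sub_self]
    rw [List.drop_eq_getElem_cons hklt]
    simp only [List.set_cons_zero]
    have htake : List.take (k+1) arr = List.take k arr ++ [arr[k]] := by
      rw [List.take_add_one]
      simp [List.getElem?_eq_getElem hklt]
    rw [htake, List.map_append]
    simp

-- B's write-back loop: the value written at position i depends only on i (through the frozen snapshot)
lemma pv_fold_set_idx (g : Int → Int) (arr : List Int) (k : Nat) (h : k ≤ arr.length) :
    (PySem.List.pyRange 0 (k : Int)).foldl
        (fun a i => a.set i.toNat (g i)) arr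
      = (List.range k).map (fun j : Nat => g (j : Int)) ++ arr.drop k := by
  induction k with
  | zero => simp [PySem.List.pyRange]
  | succ k ih =>
    have hk : k ≤ arr.length := by omega
    have hklt : k < arr.length := by omega
    have hcast : ((k + 1 : Nat) : Int) = (k : Int) + 1 := by push_cast; ring
    rw [hcast, PySem.List.pyRange_one_succ_right (by positivity), List.foldl_append, ih hk]
    simp only [List.foldl_cons, List.foldl_nil]
    have hlen : ((List.range k).map (fun j : Nat => g (j : Int))).length = k := by simp
    have htoNat : ((k : Int)).toNat = k := by omega
    rw [htoNat, List.set_append, if_neg (by omega), hlen, Nat.sub_self]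
    rw [List.drop_eq_getElem_cons hklt]
    simp only [List.set_cons_zero]
    rw [List.range_succ, List.map_append]
    simp

-- keys not in l are untouched by A's insert loop
lemma pv_build_notmem (l : List Int) (x : Int) (hx : x ∉ l) :
    ∀ (d : PySem.Dict Int Int) (v : Int),
      ((l.foldl (fun s a => (s.1.insert a s.2, s.2 + 1)) (d, v)).1).getD x 0 = d.getD x 0 := by
  induction l with
  | nil => intro d v; rfl
  | cons a t ih =>
    intro d v
    simp only [List.foldl_cons]
    rw [ih (by simp at hx; exact hx.2) _ _]
    rw [PySem.Dict.getD_insert]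
    rw [if_neg (by simp at hx; exact hx.1)]

-- A's dict lookup on a sorted l: rank of x = start value + (#elements ≤ x) - 1
lemma pv_build_getD (l : List Int) (hs : l.Pairwise (· ≤ ·)) (x : Int) (hx : x ∈ l) :
    ∀ (d : PySem.Dict Int Int) (v : Int),
      ((l.foldl (fun s a => (s.1.insert a s.2, s.2 + 1)) (d, v)).1).getD x 0
        = v + (l.countP (fun y => decide (y ≤ x)) : Int) - 1 := by
  induction l with
  | nil => simp at hx
  | cons a t ih =>
    intro d v
    rw [List.pairwise_cons] at hs
    obtain ⟨ha, ht⟩ := hs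
    simp only [List.foldl_cons]
    by_cases hxt : x ∈ t
    · rw [ih ht hxt _ _]
      have hax : a ≤ x := ha x hxt
      rw [List.countP_cons]
      simp [hax]
      ring
    · have hxa : x = a := by simp at hx; tauto
      subst hxa
      rw [pv_build_notmem t x hxt]
      rw [PySem.Dict.getD_insert, if_pos rfl]
      have hc : t.countP (fun y => decide (y ≤ x)) = 0 := by
        rw [List.countP_eq_zero]
        intro y hy
        have h1 : x ≤ y := ha y hy
        have h2 : ¬ (y ≤ x) := by
          intro hle
          have : y = x := le_antisymm hle h1
          exact hxt (this ▸ hy)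
        simpa using h2
      rw [List.countP_cons, hc]
      simp

-- B's counting fold IS countP
lemma pv_count_fold (l : List Int) (x : Int) :
    l.foldl (fun acc v => if v ≤ x then acc + 1 else acc) (0 : Int)
      = (l.countP (fun y => decide (y ≤ x)) : Int) := by
  have := PySem.List.foldl_ite_add_one (fun v => v ≤ x) l (0 : Int)
  simpa using this

-- ===== VERDICT (by name: the statement is the Claim_ definition above) =====
theorem convert_spec : Claim_equal_convert := by
  intro arr n _ hpre
  unfold Pre_convert at hpre
  unfold Spec_convert convert convert_alt
  dsimp only []
  by_cases hn : n ≤ 0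
  · rw [PySem.List.pyRange_one_eq_nil hn]
    simp
  · rw [not_le] at hn
    have hk : ((n.toNat : Nat) : Int) = n := Int.toNat_of_nonneg (by omega)
    set k := n.toNat with hkdef
    have hklen : k ≤ arr.length := by omega
    have href : PySem.List.slice arr none (some n) = arr.take k := by
      rw [PySem.List.slice_to arr (show (0:Int) ≤ n by omega)]
    rw [href, ← hk, pv_take_map arr k hklen]
    set ref := arr.take k with hrefdef
    have hreflen : ref.length = k := by simp [hrefdef, List.length_take, Nat.min_eq_left hklen]
    set temp := PySem.List.sorted ref (fun x => x) with htemp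
    have hperm : temp.Perm ref := PySem.List.sorted_perm _ _ _
    have hsort : temp.Pairwise (· ≤ ·) := by
      have := PySem.List.sorted_pairwise ref (fun x => x)
      simpa using this
    have hlt : temp.length = k := by rw [PySem.List.length_sorted, hreflen]
    -- turn the dict-building fold over range(n) reading temp[i] into a fold over temp itself
    rw [show (k : Int) = (temp.length : Int) by rw [hlt]]
    rw [PySem.List.foldl_pyRange_zero_pyGetD' temp 0
          (fun (s : PySem.Dict Int Int × Int) x => (s.1.insert x s.2, s.2 + 1)) (PySem.Dict.empty, 0)]
    rw [show ((temp.length : Nat) : Int) = ((k : Nat) : Int) by rw [hlt]]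
    -- both write-back loops fill the first k positions
    rw [pv_fold_set (fun t => (temp.foldl
          (fun (s : PySem.Dict Int Int × Int) x => (s.1.insert x s.2, s.2 + 1))
          (PySem.Dict.empty, 0)).1.getD t 0) arr k hklen]
    rw [pv_fold_set_idx (fun i =>
          (ref.foldl (fun acc v => if v ≤ PySem.List.pyGetD ref i 0 then acc + 1 else acc) (0 : Int)) - 1)
        arr k hklen]
    congr 1
    -- element-wise: A's dict rank of ref[j] = B's count at index j
    apply List.ext_getElem (by simp [hrefdef]; omega)
    intro j hj1 hj2
    have hjk : j < k := by simp at hj1; omega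
    rw [List.getElem_map, List.getElem_map, List.getElem_range]
    have hgd : PySem.List.pyGetD ref (j : Int) 0 = ref[j]'(by omega) := by
      rw [PySem.List.pyGetD_natCast, List.getD_eq_getElem _ _ (by omega)]
    have hxmem : ref[j]'(by omega) ∈ ref := List.getElem_mem _
    have hxtemp : ref[j]'(by omega) ∈ temp := hperm.mem_iff.mpr hxmem
    rw [hgd, pv_count_fold, pv_build_getD temp hsort _ hxtemp PySem.Dict.empty 0]
    rw [hperm.countP_eq]
    ring
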